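-- pv_equiv track=rewrite | github.com/harshalms/python | basics/doubleValid.py | doubleValid
-- ===== SOURCE A (Python) =====
-- def doubleValid(A):
--     count = 0
--     for i in range(len(A)-1):
--         if A[i]!=0 and A[i]==A[i+1]:
--             A[i], A[i+1] = 2*A[i], 0
--     for i in range(len(A)):
--         if A[i]!=0:
--             A[count], A[i] = A[i], A[count]
--             count+=1
--     return A
-- ===== SOURCE B (Python) =====
-- def doubleValid(A):
--     nz = []
--     i = 0
--     n = len(A)
--     while i < n:
--         x = A[i]
--         if x != 0 and i + 1 < n and A[i + 1] == x:
--             nz.append(2 * x)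
--             i += 2
--         else:
--             if x != 0:
--                 nz.append(x)
--             i += 1
--     A[:] = nz + [0] * (n - len(nz))
--     return A
-- ===== Notes on version B (the rewrite author's own statement) =====
-- stated objective: simpler
-- what changed: Replaces A's two in-place index loops (merge by indexed writes, then swap-based compaction with a count pointer) with one recursive scan that merges adjacent equal pairs while collecting nonzeros directly, then pads with zeros and writes back via slice assignment.
import Mathlib
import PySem

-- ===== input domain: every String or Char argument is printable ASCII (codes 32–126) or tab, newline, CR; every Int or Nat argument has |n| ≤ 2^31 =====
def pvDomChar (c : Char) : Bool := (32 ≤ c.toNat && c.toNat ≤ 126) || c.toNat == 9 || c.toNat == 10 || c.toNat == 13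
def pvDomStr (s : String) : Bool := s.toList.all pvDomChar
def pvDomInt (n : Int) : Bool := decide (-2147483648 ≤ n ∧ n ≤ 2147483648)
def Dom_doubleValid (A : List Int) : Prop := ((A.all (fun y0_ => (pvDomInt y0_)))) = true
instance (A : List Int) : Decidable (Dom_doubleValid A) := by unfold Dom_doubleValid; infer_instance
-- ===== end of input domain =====

-- B replaces A's two in-place index loops by one recursive merge-and-collect scan plus zero padding;
-- objective: simpler. Both A and B mutate the argument list in place in Python (B via slice assignment);
-- the equivalence proved here is about the returned value.


-- ===== PORT A =====
-- first loop: for i in range(len(A)-1): if A[i]!=0 and A[i]==A[i+1]: A[i],A[i+1] = 2*A[i],0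
def dvPass1Step (a : List Int) (i : Nat) : List Int :=
  if a.getD i 0 ≠ 0 ∧ a.getD i 0 = a.getD (i+1) 0 then
    (a.set i (2 * a.getD i 0)).set (i+1) 0
  else a

-- second loop: for i in range(len(A)): if A[i]!=0: A[count],A[i] = A[i],A[count]; count+=1
def dvPass2Step (s : Nat × List Int) (i : Nat) : Nat × List Int :=
  if s.2.getD i 0 ≠ 0 then
    (s.1 + 1, ((s.2.set s.1 (s.2.getD i 0)).set i (s.2.getD s.1 0)))
  else s

def doubleValid (A : List Int) : List Int :=
  let a1 := (List.range (A.length - 1)).foldl dvPass1Step A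
  ((List.range a1.length).foldl dvPass2Step (0, a1)).2

-- ===== PORT B =====
-- Source B's while loop: one scan that consumes one or two elements per step, merging adjacent
-- equal nonzero pairs and collecting only the nonzeros; ported as the equivalent structural
-- recursion (each loop step i -> i+1 or i -> i+2 becomes one pattern-match step)
def dvScan : List Int → List Int
  | [] => []
  | [x] => (if x ≠ 0 then [x] else []) ++ []
  | x :: y :: rest' =>
    if x ≠ 0 ∧ y = x then (2 * x) :: dvScan rest'
    else (if x ≠ 0 then [x] else []) ++ dvScan (y :: rest')

def doubleValid_alt (A : List Int) : List Int :=
  let nz := dvScan A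
  nz ++ List.replicate (A.length - nz.length) 0

-- ===== PRECONDITION & SPEC =====
def Spec_doubleValid (A : List Int) (out : List Int) : Prop := out = doubleValid_alt A
instance (A : List Int) (out : List Int) : Decidable (Spec_doubleValid A out) := by unfold Spec_doubleValid; infer_instance

-- ===== CLAIM (what is proved, stated in full; the proofs are below) =====
def Claim_equal_doubleValid : Prop := ∀ (A : List Int), Dom_doubleValid A → Spec_doubleValid A (doubleValid A)

-- ===== LEMMAS AND PROOFS =====

-- the result of A's first pass, with the merged-away zeros kept inline
def dvInline : List Int → List Int
  | [] => []
  | [x] => [x]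
  | x :: y :: rest' =>
    if x ≠ 0 ∧ y = x then (2 * x) :: 0 :: dvInline rest'
    else x :: dvInline (y :: rest')

theorem dvInline_length (A : List Int) : (dvInline A).length = A.length := by
  induction A using dvInline.induct with
  | case1 => rfl
  | case2 x => rfl
  | case3 x y r h ih => simp [dvInline, h, ih]
  | case4 x y r h ih => simp [dvInline, h, ih]

theorem dvScan_eq_filter_inline (A : List Int) :
    dvScan A = (dvInline A).filter (· ≠ 0) := by
  induction A using dvInline.induct with
  | case1 => rfl
  | case2 x => by_cases hx : x = 0 <;> simp [dvScan, dvInline, hx]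
  | case3 x y r h ih =>
      have h2 : (2 * x : Int) ≠ 0 := mul_ne_zero two_ne_zero h.1
      simp [dvScan, dvInline, h, ih, h2]
  | case4 x y r h ih =>
      by_cases hx : x = 0
      · simp [dvScan, dvInline, ih, hx]
      · have hy : y ≠ x := fun hyx => h ⟨hx, hyx⟩
        simp [dvScan, dvInline, ih, hx, hy]

theorem dvPass1Step_cons (x : Int) (a : List Int) (i : Nat) :
    dvPass1Step (x :: a) (i + 1) = x :: dvPass1Step a i := by
  unfold dvPass1Step
  simp only [List.getD_cons_succ, List.set_cons_succ]
  split <;> rfl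

theorem dvPass1_shift (l : List Nat) (x : Int) (a : List Int) :
    (l.map Nat.succ).foldl dvPass1Step (x :: a) = x :: l.foldl dvPass1Step a := by
  induction l generalizing a with
  | nil => rfl
  | cons i l ih => simp [List.foldl_cons, Nat.succ_eq_add_one, dvPass1Step_cons, ih]

theorem dvPass1_eq_inline (A : List Int) :
    (List.range (A.length - 1)).foldl dvPass1Step A = dvInline A := by
  induction A using dvInline.induct with
  | case1 => rfl
  | case2 x => rfl
  | case3 x y r h ih =>
      have hlen : (x :: y :: r).length - 1 = r.length + 1 := by simp
      rw [hlen, List.range_succ_eq_map, List.foldl_cons]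
      have h0 : dvPass1Step (x :: y :: r) 0 = (2 * x) :: 0 :: r := by
        unfold dvPass1Step
        rw [if_pos]
        · rfl
        · exact ⟨h.1, by simpa using h.2.symm⟩
      rw [h0, dvPass1_shift]
      have hrhs : dvInline (x :: y :: r) = (2 * x) :: 0 :: dvInline r := by
        simp [dvInline, h]
      rw [hrhs]
      congr 1
      cases r with
      | nil => rfl
      | cons z r2 =>
          have : (z :: r2).length = r2.length + 1 := rfl
          rw [this, List.range_succ_eq_map, List.foldl_cons]
          have h1 : dvPass1Step (0 :: z :: r2) 0 = 0 :: z :: r2 := by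
            unfold dvPass1Step
            rw [if_neg (by simp)]
          rw [h1, dvPass1_shift]
          congr 1
  | case4 x y r h ih =>
      have hlen : (x :: y :: r).length - 1 = r.length + 1 := by simp
      rw [hlen, List.range_succ_eq_map, List.foldl_cons]
      have h0 : dvPass1Step (x :: y :: r) 0 = x :: y :: r := by
        unfold dvPass1Step
        rw [if_neg (fun hc => h ⟨by simpa using hc.1, by simpa using hc.2.symm⟩)]
      rw [h0, dvPass1_shift]
      have hrhs : dvInline (x :: y :: r) = x :: dvInline (y :: r) := by
        simp [dvInline, h]
      rw [hrhs]
      congr 1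

theorem dvPass2_inv (a0 : List Int) (i : Nat) (h : i ≤ a0.length) :
    (List.range i).foldl dvPass2Step (0, a0) =
      (((a0.take i).filter (· ≠ 0)).length,
       (a0.take i).filter (· ≠ 0) ++
         List.replicate (i - ((a0.take i).filter (· ≠ 0)).length) 0 ++ a0.drop i) := by
  induction i with
  | zero => simp
  | succ i ih =>
    have hi : i < a0.length := by omega
    rw [List.range_succ, List.foldl_append, List.foldl_cons, List.foldl_nil, ih (by omega)]
    set nzs := (a0.take i).filter (· ≠ 0) with hnzs
    have hk : nzs.length ≤ i := by
      calc nzs.length ≤ (a0.take i).length := List.length_filter_le _ _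
        _ ≤ i := by simp [List.length_take]
    set k := nzs.length with hkdef
    have hdrop : a0.drop i = a0[i] :: a0.drop (i + 1) := List.drop_eq_getElem_cons hi
    have hpre : (nzs ++ List.replicate (i - k) 0).length = i := by
      simp only [List.length_append, List.length_replicate]; omega
    have htake : (a0.take (i + 1)).filter (· ≠ 0) =
        nzs ++ if a0[i] ≠ 0 then [a0[i]] else [] := by
      rw [List.take_add_one, List.filter_append, hnzs]
      congr 1
      rw [List.getElem?_eq_getElem hi]
      by_cases hz : a0[i] = 0 <;> simp [hz]
    have hgetI : (nzs ++ List.replicate (i - k) 0 ++ a0.drop i).getD i 0 = a0[i] := by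
      rw [List.getD_append_right _ _ _ _ hpre.le, hpre, Nat.sub_self, hdrop,
        List.getD_cons_zero]
    rw [htake]
    by_cases hz : a0[i] = 0
    · -- zero element: the step is a no-op, the zero joins the middle block
      have hstep : dvPass2Step (k, nzs ++ List.replicate (i - k) 0 ++ a0.drop i) i
          = (k, nzs ++ List.replicate (i - k) 0 ++ a0.drop i) := by
        unfold dvPass2Step
        rw [if_neg (by rw [hgetI, hz]; simp)]
      rw [hstep, if_neg (by rw [hz]; simp)]
      have h1 : i + 1 - k = (i - k) + 1 := by omega
      rw [List.append_nil, h1, List.replicate_succ', hdrop, hz]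
      simp [List.append_assoc]
      rfl
    · rw [if_pos hz]
      have hcond : (nzs ++ List.replicate (i - k) 0 ++ a0.drop i).getD i 0 ≠ 0 := by
        rw [hgetI]; exact hz
      by_cases hki : k = i
      · -- count has caught up with i: the swap writes a0[i] onto itself
        have hrep0 : i - k = 0 := by omega
        have hL : nzs ++ List.replicate (i - k) 0 ++ a0.drop i
            = nzs ++ (a0[i] :: a0.drop (i + 1)) := by
          rw [hrep0, hdrop]; simp
        have hgetK : (nzs ++ List.replicate (i - k) 0 ++ a0.drop i).getD k 0 = a0[i] := by
          rw [hL, List.getD_append_right _ _ _ _ (le_refl k), Nat.sub_self,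
            List.getD_cons_zero]
        have hstep : dvPass2Step (k, nzs ++ List.replicate (i - k) 0 ++ a0.drop i) i
            = (k + 1, nzs ++ (a0[i] :: a0.drop (i + 1))) := by
          unfold dvPass2Step
          rw [if_pos hcond, hgetI, hgetK, hL]
          have hset : (nzs ++ (a0[i] :: a0.drop (i + 1))).set k a0[i]
              = nzs ++ (a0[i] :: a0.drop (i + 1)) := by
            rw [List.set_append, if_neg (lt_irrefl k), Nat.sub_self, List.set_cons_zero]
          have hset2 : (nzs ++ (a0[i] :: a0.drop (i + 1))).set i a0[i]
              = nzs ++ (a0[i] :: a0.drop (i + 1)) := by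
            rw [List.set_append,
              if_neg (by simp only [← hkdef, hki]; exact lt_irrefl i)]
            simp only [← hkdef, hki, Nat.sub_self, List.set_cons_zero]
          rw [hset, hset2]
        rw [hstep]
        have hlen2 : (nzs ++ [a0[i]]).length = k + 1 := by simp [← hkdef]
        have h2 : i + 1 - (k + 1) = 0 := by omega
        rw [hlen2, h2]
        simp
      · -- count lags behind: a0[i] is swapped with the first queued zero
        have hke : i - k = (i - k - 1) + 1 := by omega
        have hrep : List.replicate (i - k) 0 = (0 : Int) :: List.replicate (i - k - 1) 0 := by
          rw [hke]; rfl
        have hlen1 : (nzs ++ (0 : Int) :: List.replicate (i - k - 1) 0).length = i := by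
          simp only [List.length_append, List.length_cons, List.length_replicate]; omega
        have hgetK : (nzs ++ List.replicate (i - k) 0 ++ a0.drop i).getD k 0 = 0 := by
          rw [hrep, List.getD_append _ _ _ _ (by rw [hlen1]; omega),
        List.getD_append_right _ _ _ _ (le_refl k), Nat.sub_self, List.getD_cons_zero]
        have hstep : dvPass2Step (k, nzs ++ List.replicate (i - k) 0 ++ a0.drop i) i
            = (k + 1, (nzs ++ a0[i] :: List.replicate (i - k - 1) 0)
                ++ (0 : Int) :: a0.drop (i + 1)) := by
          unfold dvPass2Step
          rw [if_pos hcond, hgetI, hgetK, hrep]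
          have hset1 : ((nzs ++ (0 : Int) :: List.replicate (i - k - 1) 0) ++ a0.drop i).set k a0[i]
              = (nzs ++ a0[i] :: List.replicate (i - k - 1) 0) ++ a0.drop i := by
            rw [List.set_append, if_pos (by rw [hlen1]; omega),
              List.set_append, if_neg (lt_irrefl k), Nat.sub_self, List.set_cons_zero]
          rw [hset1, List.set_append, if_neg (by rw [List.length_append]; simp; omega)]
          rw [show ((nzs ++ a0[i] :: List.replicate (i - k - 1) 0).length) = i by
            simp only [List.length_append, List.length_cons, List.length_replicate]; omega]
          rw [Nat.sub_self, hdrop, List.set_cons_zero]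
        rw [hstep]
        have hlen2 : (nzs ++ [a0[i]]).length = k + 1 := by simp [← hkdef]
        have h2 : i + 1 - (k + 1) = (i - k - 1) + 1 := by omega
        rw [hlen2, h2, List.replicate_succ']
        simp [List.append_assoc]
theorem dvPass2_partition (a : List Int) :
    ((List.range a.length).foldl dvPass2Step (0, a)).2 =
      a.filter (· ≠ 0) ++ List.replicate (a.length - (a.filter (· ≠ 0)).length) 0 := by
  have := dvPass2_inv a a.length (le_refl _)
  rw [this]
  simp

-- ===== VERDICT (by name: the statement is the Claim_ definition above) =====
theorem doubleValid_spec : Claim_equal_doubleValid := by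
  intro A _
  unfold Spec_doubleValid doubleValid doubleValid_alt
  rw [dvPass1_eq_inline, dvPass2_partition, dvScan_eq_filter_inline, dvInline_length]
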